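-- pv_equiv track=rewrite | github.com/qgzm/LeetCode | demo23/2327. 知道秘密的人数.py | peopleAwareOfSecret
-- ===== SOURCE A (Python) =====
-- def peopleAwareOfSecret(n: int, delay: int, forget: int) -> int:
--     if delay > forget:
--         return 0
--     dp=[0]*n
--     dp[0]=1
--     cnt=0
--     for i,v in enumerate(dp):
--         if i+delay>=n:
--             cnt+=v
--         for j in range(i+delay,min(i+forget,n)):
--             dp[j]=(dp[j]+v)%1000000007
--     return (dp[-1]+cnt)%1000000007
-- ===== SOURCE B (Python) =====
-- def peopleAwareOfSecret(n: int, delay: int, forget: int) -> int: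
--     if delay > forget:
--         return 0
--     M = 1000000007
--     new = [0] * n
--     new[0] = 1
--     share = 0
--     for i in range(1, n):
--         if i - delay >= 0:
--             share = (share + new[i - delay]) % M
--         if i - forget >= 0:
--             share = (share - new[i - forget]) % M
--         new[i] = share
--     return sum(new[max(0, n - forget):]) % M
-- ===== Notes on version B (the rewrite author's own statement) =====
-- stated objective: alternative
-- what changed: Replaces A's forward range-add DP (each day pushes its value onto a window of future days, rescanning the window per day) by a single pass that maintains the window sum of current sharers with a sliding-window add/subtract and then sums the last forget days.
-- intended difference: For n = 1 (with delay <= forget) A returns 2 because both dp[-1] and cnt count the single starting person, while B returns 1, the intended number of people aware of the secret after one day. — e.g. on peopleAwareOfSecret(1, 1, 1): A returns 2, B returns 1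
-- outside the precondition, e.g. on peopleAwareOfSecret(2, -1, 0): A returns 1, B raises IndexError; on peopleAwareOfSecret(3, 0, 2): A returns 2, B returns 1000000006
import Mathlib
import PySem

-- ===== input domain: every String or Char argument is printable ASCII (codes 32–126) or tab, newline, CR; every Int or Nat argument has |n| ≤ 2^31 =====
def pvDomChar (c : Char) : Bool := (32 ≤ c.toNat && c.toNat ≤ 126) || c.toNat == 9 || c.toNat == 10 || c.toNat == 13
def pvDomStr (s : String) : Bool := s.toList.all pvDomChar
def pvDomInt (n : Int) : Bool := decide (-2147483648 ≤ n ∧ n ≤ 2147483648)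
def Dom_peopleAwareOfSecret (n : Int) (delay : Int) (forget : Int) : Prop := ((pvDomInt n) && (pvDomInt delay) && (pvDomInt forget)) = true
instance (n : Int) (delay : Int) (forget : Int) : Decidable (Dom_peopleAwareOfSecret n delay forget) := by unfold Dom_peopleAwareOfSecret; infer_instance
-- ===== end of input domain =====

-- B computes each day's new learners with a sliding-window running sum instead of A's
-- forward range-add DP; for n = 1 A double-counts the single person (returns 2), B returns
-- the intended 1 (see D_ below).


def pvM : Int := 1000000007

-- ===== PORT A =====
-- inner loop: for j in range(lo, hi): dp[j] = (dp[j] + v) % 1000000007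
def pvInner (v lo hi : Int) (dp : List Int) : List Int :=
  (PySem.List.pyRange lo hi 1).foldl
    (fun dp j => PySem.List.pySetD dp j ((PySem.List.pyGetD dp j 0 + v) % pvM)) dp

-- one iteration of A's outer loop (i, v = dp[i])
def pvAStep (n delay forget : Int) (s : List Int × Int) (i : Int) : List Int × Int :=
  let v := PySem.List.pyGetD s.1 i 0
  let cnt := if n ≤ i + delay then s.2 + v else s.2
  (pvInner v (i + delay) (min (i + forget) n) s.1, cnt)

def peopleAwareOfSecret (n : Int) (delay : Int) (forget : Int) : Int :=
  if forget < delay then 0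
  else
    let dp0 := PySem.List.pySetD (List.replicate n.toNat 0) 0 1   -- dp=[0]*n; dp[0]=1 (IndexError for n ≤ 0: outside Pre_)
    let s := (PySem.List.pyRange 0 n 1).foldl (pvAStep n delay forget) (dp0, 0)
    (PySem.List.pyGetD s.1 (-1) 0 + s.2) % pvM

-- ===== PORT B =====
-- one iteration of B's loop: slide the window sum and record new[i]
def pvBStep (delay forget : Int) (p : List Int × Int) (i : Int) : List Int × Int :=
  let s1 := if 0 ≤ i - delay then (p.2 + PySem.List.pyGetD p.1 (i - delay) 0) % pvM else p.2
  let s2 := if 0 ≤ i - forget then (s1 - PySem.List.pyGetD p.1 (i - forget) 0) % pvM else s1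
  (PySem.List.pySetD p.1 i s2, s2)

def peopleAwareOfSecret_alt (n : Int) (delay : Int) (forget : Int) : Int :=
  if forget < delay then 0
  else
    let new0 := PySem.List.pySetD (List.replicate n.toNat 0) 0 1   -- new=[0]*n; new[0]=1
    let p := (PySem.List.pyRange 1 n 1).foldl (pvBStep delay forget) (new0, 0)
    (PySem.List.slice p.1 (some (max 0 (n - forget))) none).sum % pvM

-- ===== PRECONDITION & SPEC =====
-- Pre_ excludes n ≤ 0 (A raises IndexError at dp[0]=1) and nonpositive delay with delay ≤ forget,
-- where A's inner range indexes dp with negative j and wraps around — an artefact of A's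
-- implementation on which B's algorithm raises IndexError (delay < 0) or returns another value.
def Pre_peopleAwareOfSecret (n : Int) (delay : Int) (forget : Int) : Prop :=
  forget < delay ∨ (1 ≤ delay ∧ 1 ≤ n)
instance (n : Int) (delay : Int) (forget : Int) : Decidable (Pre_peopleAwareOfSecret n delay forget) := by unfold Pre_peopleAwareOfSecret; infer_instance

def pvWitness_peopleAwareOfSecret : Int × Int × Int := (6, 2, 4)

-- For n = 1 (with delay ≤ forget) A returns 2 because both dp[-1] and cnt count the single
-- starting person, while B returns 1, the intended number of people aware after one day.
def D_peopleAwareOfSecret (n : Int) (delay : Int) (forget : Int) : Prop := n = 1 ∧ delay ≤ forget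
instance (n : Int) (delay : Int) (forget : Int) : Decidable (D_peopleAwareOfSecret n delay forget) := by unfold D_peopleAwareOfSecret; infer_instance

def Spec_peopleAwareOfSecret (n : Int) (delay : Int) (forget : Int) (out : Int) : Prop := ¬ D_peopleAwareOfSecret n delay forget → out = peopleAwareOfSecret_alt n delay forget
instance (n : Int) (delay : Int) (forget : Int) (out : Int) : Decidable (Spec_peopleAwareOfSecret n delay forget out) := by unfold Spec_peopleAwareOfSecret; infer_instance

def pvDiffWitness_peopleAwareOfSecret : Int × Int × Int := (1, 1, 1)
def pvDiffWitnessOut_peopleAwareOfSecret : Int × Int := (2, 1)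

-- ===== CLAIM (what is proved, stated in full; the proofs are below) =====
def Claim_unchanged_peopleAwareOfSecret : Prop := ∀ (n : Int) (delay : Int) (forget : Int), Dom_peopleAwareOfSecret n delay forget → Pre_peopleAwareOfSecret n delay forget → Spec_peopleAwareOfSecret n delay forget (peopleAwareOfSecret n delay forget)
def Claim_changed_peopleAwareOfSecret : Prop := Dom_peopleAwareOfSecret (pvDiffWitness_peopleAwareOfSecret.1) (pvDiffWitness_peopleAwareOfSecret.2.1) (pvDiffWitness_peopleAwareOfSecret.2.2) ∧ Pre_peopleAwareOfSecret (pvDiffWitness_peopleAwareOfSecret.1) (pvDiffWitness_peopleAwareOfSecret.2.1) (pvDiffWitness_peopleAwareOfSecret.2.2) ∧ D_peopleAwareOfSecret (pvDiffWitness_peopleAwareOfSecret.1) (pvDiffWitness_peopleAwareOfSecret.2.1) (pvDiffWitness_peopleAwareOfSecret.2.2) ∧ peopleAwareOfSecret (pvDiffWitness_peopleAwareOfSecret.1) (pvDiffWitness_peopleAwareOfSecret.2.1) (pvDiffWitness_peopleAwareOfSecret.2.2) = pvDiffWitnessOut_peopleAwareOfSecret.1 ∧ peopleAwareOfSecret_alt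 (pvDiffWitness_peopleAwareOfSecret.1) (pvDiffWitness_peopleAwareOfSecret.2.1) (pvDiffWitness_peopleAwareOfSecret.2.2) = pvDiffWitnessOut_peopleAwareOfSecret.2 ∧ pvDiffWitnessOut_peopleAwareOfSecret.1 ≠ pvDiffWitnessOut_peopleAwareOfSecret.2
def Claim_exact_peopleAwareOfSecret : Prop := ∀ (n : Int) (delay : Int) (forget : Int), Dom_peopleAwareOfSecret n delay forget → Pre_peopleAwareOfSecret n delay forget → D_peopleAwareOfSecret n delay forget → peopleAwareOfSecret n delay forget ≠ peopleAwareOfSecret_alt n delay forget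


-- ===== LEMMAS AND PROOFS =====

-- Int-Ico summation toolkit
lemma pvSum_Ico_succ_top (F : Int → Int) (a b : Int) (h : a ≤ b) :
    (∑ i ∈ Finset.Ico a (b + 1), F i) = (∑ i ∈ Finset.Ico a b, F i) + F b := by
  have hin : Finset.Ico a (b + 1) = insert b (Finset.Ico a b) := by
    ext x; simp only [Finset.mem_Ico, Finset.mem_insert]; omega
  rw [hin, Finset.sum_insert (by simp)]; ring

lemma pvSum_Ico_succ_bot (F : Int → Int) (a b : Int) (h : a < b) :
    (∑ i ∈ Finset.Ico a b, F i) = F a + ∑ i ∈ Finset.Ico (a + 1) b, F i := by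
  have hin : Finset.Ico a b = insert a (Finset.Ico (a + 1) b) := by
    ext x; simp only [Finset.mem_Ico, Finset.mem_insert]; omega
  rw [hin, Finset.sum_insert (by simp)]

lemma pvSum_Ico_split (F : Int → Int) (a b c : Int) (h1 : a ≤ b) (h2 : b ≤ c) :
    (∑ i ∈ Finset.Ico a b, F i) + (∑ i ∈ Finset.Ico b c, F i) = ∑ i ∈ Finset.Ico a c, F i := by
  rw [← Finset.sum_union (Finset.Ico_disjoint_Ico_consecutive a b c),
      Finset.Ico_union_Ico_eq_Ico h1 h2]

-- the reference sequence: pvG d f m is the list [g 0, …, g m] of per-day new learners (mod pvM)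
noncomputable def pvG (d f : Int) : Nat → List Int
  | 0 => [1]
  | m + 1 =>
    let l := pvG d f m
    l ++ [(∑ i ∈ Finset.Ico ((m : Int) + 1 - f + 1) ((m : Int) + 1 - d + 1),
            if 0 ≤ i then l.getD i.toNat 0 else 0) % pvM]

noncomputable def pvg (d f : Int) (j : Nat) : Int := (pvG d f j).getD j 0

noncomputable def pvgI (d f : Int) (i : Int) : Int := if 0 ≤ i then pvg d f i.toNat else 0

noncomputable def pvS (d f : Int) (j : Int) : Int := ∑ i ∈ Finset.Ico (j - f + 1) (j - d + 1), pvgI d f i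

lemma pvG_length (d f : Int) (m : Nat) : (pvG d f m).length = m + 1 := by
  induction m with
  | zero => rfl
  | succ m ih => simp [pvG, ih]

lemma pvG_getD (d f : Int) : ∀ (m j : Nat), j ≤ m → (pvG d f m).getD j 0 = pvg d f j := by
  intro m
  induction m with
  | zero => intro j hj; interval_cases j; rfl
  | succ m ih =>
    intro j hj
    rcases Nat.lt_or_ge j (m + 1) with h | h
    · have hl : j < (pvG d f m).length := by rw [pvG_length]; omega
      have : (pvG d f (m + 1)).getD j 0 = (pvG d f m).getD j 0 := by
        simp only [pvG, List.getD, List.getElem?_append_left hl]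
      rw [this, ih j (by omega)]
    · have : j = m + 1 := by omega
      subst this; rfl

lemma pvg_zero (d f : Int) : pvg d f 0 = 1 := rfl

lemma pvgI_neg (d f : Int) (i : Int) (h : i < 0) : pvgI d f i = 0 := by
  simp [pvgI]; omega

lemma pvSum_zero (d f a b : Int) (h : b ≤ 0) : (∑ i ∈ Finset.Ico a b, pvgI d f i) = 0 := by
  apply Finset.sum_eq_zero
  intro i hi
  rw [Finset.mem_Ico] at hi
  exact pvgI_neg d f i (by omega)

lemma pvSum_max (d f a b : Int) :
    (∑ i ∈ Finset.Ico a b, pvgI d f i) = ∑ i ∈ Finset.Ico (max 0 a) b, pvgI d f i := by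
  by_cases h : 0 ≤ a
  · rw [max_eq_right h]
  · by_cases hb : b ≤ 0
    · rw [pvSum_zero d f a b hb, pvSum_zero d f _ b hb]
    · rw [max_eq_left (by omega), ← pvSum_Ico_split (pvgI d f) a 0 b (by omega) (by omega),
        pvSum_zero d f a 0 le_rfl, zero_add]

lemma pvg_succ (d f : Int) (hd : 1 ≤ d) (m : Nat) :
    pvg d f (m + 1) = pvS d f ((m : Int) + 1) % pvM := by
  have hlen : (pvG d f m).length = m + 1 := pvG_length d f m
  have : pvg d f (m + 1) = (∑ i ∈ Finset.Ico ((m : Int) + 1 - f + 1) ((m : Int) + 1 - d + 1),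
      if 0 ≤ i then (pvG d f m).getD i.toNat 0 else 0) % pvM := by
    simp only [pvg, pvG, List.getD, List.getElem?_append_right (by omega : (pvG d f m).length ≤ m + 1),
      hlen, Nat.sub_self]
    rfl
  rw [this, pvS]
  congr 1
  apply Finset.sum_congr rfl
  intro i hi
  rw [Finset.mem_Ico] at hi
  by_cases h0 : 0 ≤ i
  · rw [if_pos h0, pvgI, if_pos h0, pvG_getD d f m i.toNat (by omega)]
  · rw [if_neg h0, pvgI, if_neg h0]

lemma pvS_succ (d f : Int) (hdf : d ≤ f) (j : Int) :
    pvS d f (j + 1) = pvS d f j + pvgI d f (j + 1 - d) - pvgI d f (j + 1 - f) := by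
  have h1 := pvSum_Ico_succ_top (pvgI d f) (j - f + 1) (j - d + 1) (by omega)
  have h2 := pvSum_Ico_succ_bot (pvgI d f) (j - f + 1) (j - d + 1 + 1) (by omega)
  simp only [pvS]
  have e1 : j + 1 - f + 1 = j - f + 1 + 1 := by ring
  have e2 : j + 1 - d + 1 = j - d + 1 + 1 := by ring
  have e3 : j + 1 - d = j - d + 1 := by ring
  have e4 : j + 1 - f = j - f + 1 := by ring
  rw [e1, e2, e3, e4]
  linarith [h1, h2]

lemma pvgI_spec (d f : Int) (hd : 1 ≤ d) (j : Int) (hj : 1 ≤ j) :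
    pvgI d f j = pvS d f j % pvM := by
  obtain ⟨m, hm⟩ : ∃ m : Nat, j = (m : Int) + 1 := ⟨(j - 1).toNat, by omega⟩
  subst hm
  have ht : ((m : Int) + 1).toNat = m + 1 := by omega
  rw [pvgI, if_pos (by omega), ht, pvg_succ d f hd m]



-- pvInner: length preservation and pointwise characterisation
lemma pvInner_step (v lo hi : Int) (l : List Int) (h : lo < hi) :
    pvInner v lo hi l
      = pvInner v (lo + 1) hi (PySem.List.pySetD l lo ((PySem.List.pyGetD l lo 0 + v) % pvM)) := by
  simp only [pvInner, PySem.List.pyRange_one_cons h, List.foldl_cons]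

lemma pvInner_nil (v lo hi : Int) (l : List Int) (h : hi ≤ lo) : pvInner v lo hi l = l := by
  simp [pvInner, PySem.List.pyRange_one_eq_nil h]

lemma pvInner_length : ∀ (k : Nat) (v lo hi : Int) (l : List Int), (hi - lo).toNat = k →
    (pvInner v lo hi l).length = l.length := by
  intro k
  induction k with
  | zero =>
    intro v lo hi l hk
    rw [pvInner_nil v lo hi l (by omega)]
  | succ k ih =>
    intro v lo hi l hk
    rw [pvInner_step v lo hi l (by omega),
        ih v (lo + 1) hi _ (by omega), PySem.List.length_pySetD]

lemma pvInner_getD : ∀ (k : Nat) (v lo hi : Int) (l : List Int) (j : Nat),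
    (hi - lo).toNat = k → 0 ≤ lo → hi ≤ (l.length : Int) → j < l.length →
    (pvInner v lo hi l).getD j 0
      = if lo ≤ (j : Int) ∧ (j : Int) < hi then (l.getD j 0 + v) % pvM else l.getD j 0 := by
  intro k
  induction k with
  | zero =>
    intro v lo hi l j hk _ _ _
    rw [pvInner_nil v lo hi l (by omega), if_neg (by omega)]
  | succ k ih =>
    intro v lo hi l j hk hlo hhi hj
    have hlt : lo < hi := by omega
    have hcast : lo = ((lo.toNat : Nat) : Int) := by omega
    have hset : PySem.List.pySetD l lo ((PySem.List.pyGetD l lo 0 + v) % pvM)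
        = l.set lo.toNat ((l.getD lo.toNat 0 + v) % pvM) := by
      rw [hcast, PySem.List.pySetD_natCast, PySem.List.pyGetD_natCast]; simp only [Int.toNat_natCast]
    rw [pvInner_step v lo hi l hlt, hset,
        ih v (lo + 1) hi _ j (by omega) (by omega) (by simpa using hhi) (by simpa using hj)]
    have hsetD : ∀ m : Nat, m < l.length →
        (l.set lo.toNat ((l.getD lo.toNat 0 + v) % pvM)).getD m 0
          = if lo.toNat = m then (l.getD lo.toNat 0 + v) % pvM else l.getD m 0 := by
      intro m hm
      simp only [List.getD, List.getElem?_set]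
      split_ifs with h1 h2
      · rfl
      · omega
      · rfl
    rw [hsetD j hj]
    have hlonat : ((lo.toNat : Nat) : Int) = lo := by omega
    by_cases heq : lo.toNat = j
    · rw [if_pos heq, if_neg (show ¬(lo + 1 ≤ (j : Int) ∧ (j : Int) < hi) by omega),
        if_pos (show lo ≤ (j : Int) ∧ (j : Int) < hi by omega), heq]
    · rw [if_neg heq]
      have hiff : (lo + 1 ≤ (j : Int) ∧ (j : Int) < hi) ↔ (lo ≤ (j : Int) ∧ (j : Int) < hi) := by
        omega
      simp only [hiff]

-- sum of a dropped suffix as an Int-Ico sum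
lemma pvDrop_sum : ∀ (k : Nat) (l : List Int) (F : Int → Int) (t : Nat),
    (∀ j : Nat, j < l.length → l.getD j 0 = F j) → l.length - t = k →
    (l.drop t).sum = ∑ i ∈ Finset.Ico (t : Int) (l.length : Int), F i := by
  intro k
  induction k with
  | zero =>
    intro l F t h hk
    rw [List.drop_eq_nil_of_le (by omega), Finset.Ico_eq_empty (by omega)]
    rfl
  | succ k ih =>
    intro l F t h hk
    have ht : t < l.length := by omega
    rw [List.drop_eq_getElem_cons ht, List.sum_cons,
        ih l F (t + 1) h (by omega),
        pvSum_Ico_succ_bot F t l.length (by exact_mod_cast ht)]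
    have : l[t] = F t := by rw [← h t ht, List.getD_eq_getElem l 0 ht]
    rw [this]
    norm_cast


-- modular-arithmetic helpers
lemma pvmod_add (a b : Int) : (a % pvM + b) % pvM = (a + b) % pvM := by
  conv_rhs => rw [Int.add_emod]
  rw [Int.add_emod (a % pvM) b, Int.emod_emod_of_dvd a dvd_rfl]

lemma pvmod_sub (a b : Int) : (a % pvM - b) % pvM = (a - b) % pvM := by
  conv_rhs => rw [Int.sub_emod]
  rw [Int.sub_emod (a % pvM) b, Int.emod_emod_of_dvd a dvd_rfl]

-- B's loop invariant: after processing days 1..k-1 the list holds pvg 0..k-1 (zeros beyond)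
-- and the running share equals pvS (k-1) % pvM
lemma pvB_loop (n d f : Int) (hd : 1 ≤ d) (hdf : d ≤ f) (hn : 1 ≤ n) :
    ∀ (k : Nat), 1 ≤ k → (k : Int) ≤ n →
    (((PySem.List.pyRange 1 (k : Int) 1).foldl (pvBStep d f)
        (PySem.List.pySetD (List.replicate n.toNat 0) 0 1, 0)).1.length = n.toNat)
    ∧ (∀ j : Nat, j < n.toNat →
        ((PySem.List.pyRange 1 (k : Int) 1).foldl (pvBStep d f)
          (PySem.List.pySetD (List.replicate n.toNat 0) 0 1, 0)).1.getD j 0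
          = if (j : Int) < (k : Int) then pvgI d f j else 0)
    ∧ ((PySem.List.pyRange 1 (k : Int) 1).foldl (pvBStep d f)
        (PySem.List.pySetD (List.replicate n.toNat 0) 0 1, 0)).2 = pvS d f ((k : Int) - 1) % pvM := by
  intro k
  induction k with
  | zero => intro h1; omega
  | succ k ih =>
    intro _ hk
    by_cases hk0 : k = 0
    · subst hk0
      have hone : (((0 : Nat) + 1 : Nat) : Int) = 1 := by norm_num
      rw [hone, PySem.List.pyRange_one_eq_nil le_rfl]
      simp only [List.foldl_nil]
      have h0 : PySem.List.pySetD (List.replicate n.toNat 0) 0 1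
          = (List.replicate n.toNat (0 : Int)).set 0 1 := by
        rw [show (0 : Int) = ((0 : Nat) : Int) from rfl, PySem.List.pySetD_natCast]
      refine ⟨by rw [h0]; simp, ?_, ?_⟩
      · intro j hj
        rw [h0]
        by_cases hj0 : j = 0
        · subst hj0
          rw [if_pos (by norm_num)]
          simp only [List.getD, List.getElem?_set, List.length_replicate, if_true]
          rw [if_pos (by omega)]
          simp [pvgI, pvg_zero]
        · rw [if_neg (by omega)]
          simp only [List.getD, List.getElem?_set, List.length_replicate,
            List.getElem?_replicate]
          rw [if_neg (by omega)]
          simp [hj]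
      · have hz : pvS d f ((1 : Int) - 1) = 0 := by
          rw [pvS]; exact pvSum_zero d f _ _ (by omega)
        rw [hz]
        norm_num
    · have hk1 : 1 ≤ k := by omega
      have hkn : (k : Int) ≤ n := by push_cast at hk ⊢; omega
      have hkn' : (k : Int) < n := by push_cast at hk; omega
      obtain ⟨hlen, hget, hshare⟩ := ih hk1 hkn
      have hsplit : PySem.List.pyRange 1 ((k + 1 : Nat) : Int) 1
          = PySem.List.pyRange 1 (k : Int) 1 ++ [(k : Int)] := by
        push_cast
        exact PySem.List.pyRange_one_succ_right (by omega)
      rw [hsplit, List.foldl_append]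
      set p := (PySem.List.pyRange 1 (k : Int) 1).foldl (pvBStep d f)
        (PySem.List.pySetD (List.replicate n.toNat 0) 0 1, 0) with hp
      simp only [List.foldl_cons, List.foldl_nil]
      have hread : ∀ (a : Int), 0 ≤ a → a < (k : Int) → PySem.List.pyGetD p.1 a 0 = pvgI d f a := by
        intro a ha halt
        have h1 : a = ((a.toNat : Nat) : Int) := by omega
        rw [h1, PySem.List.pyGetD_natCast, hget a.toNat (by omega), if_pos (by omega)]
      have hSs : pvS d f (k : Int)
          = pvS d f ((k : Int) - 1) + pvgI d f ((k : Int) - d) - pvgI d f ((k : Int) - f) := by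
        have := pvS_succ d f hdf ((k : Int) - 1)
        simpa using this
      have hshare' : (pvBStep d f p (k : Int)).2 = pvS d f (k : Int) % pvM := by
        simp only [pvBStep]
        by_cases hdk : 0 ≤ (k : Int) - d
        · rw [if_pos hdk, hread _ hdk (by omega), hshare]
          by_cases hfk : 0 ≤ (k : Int) - f
          · rw [if_pos hfk, hread _ hfk (by omega), pvmod_add, pvmod_sub, hSs]
          · rw [if_neg hfk, pvmod_add, hSs,
              pvgI_neg d f ((k : Int) - f) (by omega)]
            ring_nf
        · rw [if_neg hdk]
          have hfk : ¬ (0 ≤ (k : Int) - f) := by omega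
          rw [if_neg hfk, hshare, hSs, pvgI_neg d f ((k : Int) - d) (by omega),
            pvgI_neg d f ((k : Int) - f) (by omega)]
          ring_nf
      have hfst : (pvBStep d f p ((k : Nat) : Int)).1
          = p.1.set k ((pvBStep d f p ((k : Nat) : Int)).2) := by
        simp only [pvBStep]
        rw [PySem.List.pySetD_natCast]
      refine ⟨?_, ?_, ?_⟩
      · rw [hfst, List.length_set]
        exact hlen
      · intro j hj
        rw [hfst]
        have hplen : p.1.length = n.toNat := hlen
        by_cases h1 : k = j
        · subst h1
          rw [if_pos (by push_cast; omega)]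
          simp only [List.getD]
          rw [List.getElem?_set_self (by omega)]
          simp only [Option.getD_some]
          rw [hshare', pvgI_spec d f hd (k : Int) (by omega)]
        · simp only [List.getD, List.getElem?_set, if_neg h1]
          have : p.1[j]?.getD 0 = p.1.getD j 0 := rfl
          rw [this, hget j hj]
          by_cases hjk : (j : Int) < (k : Int)
          · rw [if_pos hjk, if_pos (by push_cast; omega)]
          · rw [if_neg hjk, if_neg (by push_cast; omega)]
      · rw [hshare']
        push_cast
        ring_nf


-- A's loop invariant: after k outer iterations dp[j] holds the partial window sum of
-- contributions from days 0..k-1 (mod pvM) and cnt the tail sum of still-waiting days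
lemma pvA_loop (n d f : Int) (hd : 1 ≤ d) (hdf : d ≤ f) (hn : 1 ≤ n) :
    ∀ (k : Nat), (k : Int) ≤ n →
    (((PySem.List.pyRange 0 (k : Int) 1).foldl (pvAStep n d f)
        (PySem.List.pySetD (List.replicate n.toNat 0) 0 1, 0)).1.length = n.toNat)
    ∧ (∀ j : Nat, j < n.toNat →
        ((PySem.List.pyRange 0 (k : Int) 1).foldl (pvAStep n d f)
          (PySem.List.pySetD (List.replicate n.toNat 0) 0 1, 0)).1.getD j 0
          = if j = 0 then 1
            else (∑ i ∈ Finset.Ico ((j : Int) - f + 1) (min (k : Int) ((j : Int) - d + 1)),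
                pvgI d f i) % pvM)
    ∧ ((PySem.List.pyRange 0 (k : Int) 1).foldl (pvAStep n d f)
        (PySem.List.pySetD (List.replicate n.toNat 0) 0 1, 0)).2
        = ∑ i ∈ Finset.Ico (max 0 (n - d)) (k : Int), pvgI d f i := by
  intro k
  induction k with
  | zero =>
    rw [show ((0 : Nat) : Int) = 0 from rfl, PySem.List.pyRange_one_eq_nil le_rfl]
    simp only [List.foldl_nil]
    intro _
    have h0 : PySem.List.pySetD (List.replicate n.toNat 0) 0 1
        = (List.replicate n.toNat (0 : Int)).set 0 1 := by
      rw [show (0 : Int) = ((0 : Nat) : Int) from rfl, PySem.List.pySetD_natCast]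
    refine ⟨by rw [h0]; simp, ?_, ?_⟩
    · intro j hj
      rw [h0]
      by_cases hj0 : j = 0
      · subst hj0
        rw [if_pos rfl]
        simp only [List.getD]
        rw [List.getElem?_set_self (by simpa using hj)]
        rfl
      · rw [if_neg hj0]
        simp only [List.getD, List.getElem?_set, List.getElem?_replicate,
          List.length_replicate]
        rw [if_neg (by omega), pvSum_zero d f _ _ (by omega)]
        simp [hj]
    · rw [Finset.Ico_eq_empty (by omega), Finset.sum_empty]
  | succ k ih =>
    intro hk
    have hkn : (k : Int) ≤ n := by push_cast at hk ⊢; omega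
    have hkn' : (k : Int) < n := by push_cast at hk; omega
    obtain ⟨hlen, hget, hcnt⟩ := ih hkn
    have hsplit : PySem.List.pyRange 0 ((k + 1 : Nat) : Int) 1
        = PySem.List.pyRange 0 (k : Int) 1 ++ [(k : Int)] := by
      push_cast
      exact PySem.List.pyRange_one_succ_right (by omega)
    rw [hsplit, List.foldl_append]
    set p := (PySem.List.pyRange 0 (k : Int) 1).foldl (pvAStep n d f)
      (PySem.List.pySetD (List.replicate n.toNat 0) 0 1, 0) with hp
    simp only [List.foldl_cons, List.foldl_nil]
    have hklen : k < n.toNat := by omega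
    have hv : PySem.List.pyGetD p.1 ((k : Nat) : Int) 0 = pvgI d f (k : Int) := by
      rw [PySem.List.pyGetD_natCast, hget k hklen]
      by_cases hk0 : k = 0
      · subst hk0
        rw [if_pos rfl]
        rfl
      · rw [if_neg hk0, min_eq_right (by omega),
          ← pvS, ← pvgI_spec d f hd (k : Int) (by omega)]
    have hilen : min ((k : Int) + f) n ≤ (p.1.length : Int) := by
      rw [hlen]; omega
    refine ⟨?_, ?_, ?_⟩
    · simp only [pvAStep]
      rw [pvInner_length ((min ((k : Int) + f) n - ((k : Int) + d)).toNat) _ _ _ _ rfl]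
      exact hlen
    · intro j hj
      simp only [pvAStep]
      rw [pvInner_getD ((min ((k : Int) + f) n - ((k : Int) + d)).toNat) _ _ _ _ j rfl
        (by omega) hilen (by omega), hv]
      by_cases hj0 : j = 0
      · subst hj0
        rw [if_neg (by omega), hget 0 hj, if_pos rfl, if_pos rfl]
      · rw [hget j hj, if_neg hj0, if_neg hj0]
        by_cases hupd : (k : Int) + d ≤ (j : Int) ∧ (j : Int) < min ((k : Int) + f) n
        · rw [if_pos hupd, pvmod_add, min_eq_left (by omega),
            show ((k + 1 : Nat) : Int) = (k : Int) + 1 from by push_cast; ring,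
            min_eq_left (by omega),
            pvSum_Ico_succ_top (pvgI d f) ((j : Int) - f + 1) (k : Int) (by omega)]
        · rw [if_neg hupd]
          by_cases hjd : (j : Int) - d + 1 ≤ (k : Int)
          · rw [min_eq_right hjd, min_eq_right (by omega)]
          · have hjf : (k : Int) + f ≤ (j : Int) := by omega
            rw [Finset.Ico_eq_empty (by omega), Finset.Ico_eq_empty (by omega)]
    · simp only [pvAStep]
      by_cases hc : n ≤ ((k : Nat) : Int) + d
      · rw [if_pos hc, hcnt, hv,
          ← pvSum_Ico_succ_top (pvgI d f) (max 0 (n - d)) (k : Int) (by omega)]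
        push_cast
        ring_nf
      · rw [if_neg hc, hcnt, Finset.Ico_eq_empty (by omega),
          Finset.Ico_eq_empty (by push_cast; omega)]


-- the tail identity: dp[n-1] (= window of day n-1) plus cnt equals the last-forget-days sum
lemma pvFinal (d f n : Int) (hd : 1 ≤ d) (hdf : d ≤ f) (hn : 2 ≤ n) :
    pvS d f (n - 1) + ∑ i ∈ Finset.Ico (max 0 (n - d)) n, pvgI d f i
      = ∑ i ∈ Finset.Ico (max 0 (n - f)) n, pvgI d f i := by
  have h1 : pvS d f (n - 1) = ∑ i ∈ Finset.Ico (n - f) (n - d), pvgI d f i := by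
    rw [pvS, show n - 1 - f + 1 = n - f from by ring, show n - 1 - d + 1 = n - d from by ring]
  rw [h1]
  by_cases h : 0 ≤ n - d
  · rw [max_eq_right h, pvSum_max d f (n - f) (n - d)]
    exact pvSum_Ico_split (pvgI d f) (max 0 (n - f)) (n - d) n (by omega) (by omega)
  · rw [pvSum_zero d f (n - f) (n - d) (by omega), zero_add, max_eq_left (by omega),
      max_eq_left (by omega)]

-- A's final value on the admitted domain (n ≥ 1)
lemma pvA_value (n d f : Int) (hd : 1 ≤ d) (hdf : d ≤ f) (hn : 1 ≤ n) :
    peopleAwareOfSecret n d f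
      = ((if n.toNat - 1 = 0 then 1 else pvS d f (n - 1) % pvM)
          + ∑ i ∈ Finset.Ico (max 0 (n - d)) n, pvgI d f i) % pvM := by
  have hcast : ((n.toNat : Nat) : Int) = n := by omega
  obtain ⟨hlen, hget, hcnt⟩ := pvA_loop n d f hd hdf hn n.toNat (le_of_eq hcast)
  rw [hcast] at hlen hget hcnt
  simp only [peopleAwareOfSecret, if_neg (show ¬ f < d from by omega)]
  set st := (PySem.List.pyRange 0 n 1).foldl (pvAStep n d f)
    (PySem.List.pySetD (List.replicate n.toNat 0) 0 1, 0) with hst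
  have hne : st.1 ≠ [] := by
    intro hnil
    rw [hnil] at hlen
    simp at hlen
    omega
  have hlast : PySem.List.pyGetD st.1 (-1) 0 = st.1.getD (st.1.length - 1) 0 := by
    rw [PySem.List.pyGetD_neg_one st.1 0 hne, List.getD_eq_getElem st.1 0 (by omega),
      List.getLast_eq_getElem]
  rw [hlast, hlen, hget (n.toNat - 1) (by omega), hcnt]
  congr 1
  by_cases h0 : n.toNat - 1 = 0
  · rw [if_pos h0, if_pos h0]
  · rw [if_neg h0, if_neg h0]
    congr 1
    rw [pvS, show ((n.toNat - 1 : Nat) : Int) = n - 1 from by omega,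
      min_eq_right (by omega)]

-- B's final value on the admitted domain (n ≥ 1)
lemma pvB_value (n d f : Int) (hd : 1 ≤ d) (hdf : d ≤ f) (hn : 1 ≤ n) :
    peopleAwareOfSecret_alt n d f
      = (∑ i ∈ Finset.Ico (max 0 (n - f)) n, pvgI d f i) % pvM := by
  have hcast : ((n.toNat : Nat) : Int) = n := by omega
  obtain ⟨hlen, hget, hshare⟩ := pvB_loop n d f hd hdf hn n.toNat (by omega) (le_of_eq hcast)
  rw [hcast] at hlen hget hshare
  simp only [peopleAwareOfSecret_alt, if_neg (show ¬ f < d from by omega)]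
  set p := (PySem.List.pyRange 1 n 1).foldl (pvBStep d f)
    (PySem.List.pySetD (List.replicate n.toNat 0) 0 1, 0) with hp
  have hgets : ∀ j : Nat, j < p.1.length → p.1.getD j 0 = pvgI d f j := by
    intro j hj
    rw [hlen] at hj
    rw [hget j hj, if_pos (by omega)]
  have ha : max 0 (n - f) = (((max 0 (n - f)).toNat : Nat) : Int) := by omega
  rw [ha, PySem.List.slice_from_natCast,
    pvDrop_sum (p.1.length - (max 0 (n - f)).toNat) p.1 (pvgI d f) _ hgets rfl, hlen, hcast]

-- ===== VERDICT (by name: the statement is the Claim_ definition above) =====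
theorem peopleAwareOfSecret_spec : Claim_unchanged_peopleAwareOfSecret := by
  intro n d f hdom hpre
  unfold Spec_peopleAwareOfSecret
  intro hnD
  by_cases hfd : f < d
  · simp [peopleAwareOfSecret, peopleAwareOfSecret_alt, if_pos hfd]
  · have hdf : d ≤ f := by omega
    obtain ⟨hd, hn⟩ : 1 ≤ d ∧ 1 ≤ n := by
      rcases hpre with h | h
      · omega
      · exact h
    have hn2 : 2 ≤ n := by
      rcases Int.lt_or_lt_of_ne (show n ≠ 1 from fun h => hnD ⟨h, hdf⟩) with h | h
      · omega
      · omega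
    rw [pvA_value n d f hd hdf (by omega), pvB_value n d f hd hdf (by omega),
      if_neg (by omega), pvmod_add, pvFinal d f n hd hdf hn2]

theorem peopleAwareOfSecret_changed : Claim_changed_peopleAwareOfSecret := by
  unfold Claim_changed_peopleAwareOfSecret; decide

theorem peopleAwareOfSecret_tight : Claim_exact_peopleAwareOfSecret := by
  intro n d f hdom hpre hD
  obtain ⟨hn1, hdf⟩ := hD
  subst hn1
  have hd : 1 ≤ d := by
    rcases hpre with h | h
    · omega
    · exact h.1
  have hA : peopleAwareOfSecret 1 d f = 2 := by
    rw [pvA_value 1 d f hd hdf (by omega)]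
    rw [if_pos (by norm_num), max_eq_left (by omega),
      show Finset.Ico (0 : Int) 1 = {0} from by decide, Finset.sum_singleton]
    rw [pvgI, if_pos le_rfl]
    show (1 + pvg d f 0) % pvM = 2
    rw [pvg_zero]
    decide
  have hB : peopleAwareOfSecret_alt 1 d f = 1 := by
    rw [pvB_value 1 d f hd hdf (by omega)]
    rw [max_eq_left (by omega)]
    have : Finset.Ico (0 : Int) 1 = {0} := by decide
    rw [this, Finset.sum_singleton]
    rw [pvgI, if_pos le_rfl]
    show pvg d f 0 % pvM = 1
    rw [pvg_zero]
    decide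
  rw [hA, hB]
  decide
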